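-- pv_equiv track=rewrite | github.com/MayroseLab/Lior | Barley/python/kmerGWAS/workflow/scripts/create_phenotype_report.py | fix_attr
-- ===== SOURCE A (Python) =====
-- def fix_attr(attr_list):
--     fixed = []
--     for a in attr_list:
--         if '=' in a:
--             fixed.append(a)
--         else:
--             fixed[-1] += ';%s' % a
--     return fixed
-- ===== SOURCE B (Python) =====
-- def fix_attr(attr_list):
--     # Build the result back-to-front: repeatedly locate the LAST '='-token,
--     # join everything from it onward as one group, and continue on the prefix.
--     out = []
--     rest = attr_list
--     while rest:
--         k = max(i for i, a in enumerate(rest) if '=' in a)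
--         out.insert(0, ';'.join(rest[k:]))
--         rest = rest[:k]
--     return out
-- ===== Notes on version B (the rewrite author's own statement) =====
-- stated objective: alternative
-- what changed: A scans forward once, appending '='-tokens and concatenating fragments onto the last element of the accumulator; B builds the result back-to-front: it repeatedly finds the index of the LAST '='-token, joins the whole suffix from it as one group, and continues on the remaining prefix.
import Mathlib
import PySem

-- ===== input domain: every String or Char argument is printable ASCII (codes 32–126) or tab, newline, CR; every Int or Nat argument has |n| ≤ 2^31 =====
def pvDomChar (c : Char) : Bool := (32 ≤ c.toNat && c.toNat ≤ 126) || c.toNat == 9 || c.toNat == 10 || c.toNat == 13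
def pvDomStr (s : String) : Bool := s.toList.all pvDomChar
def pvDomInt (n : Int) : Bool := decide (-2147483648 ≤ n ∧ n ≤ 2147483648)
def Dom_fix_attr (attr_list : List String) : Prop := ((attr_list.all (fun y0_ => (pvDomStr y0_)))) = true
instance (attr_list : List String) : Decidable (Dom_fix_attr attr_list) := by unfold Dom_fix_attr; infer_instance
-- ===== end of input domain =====

-- B replaces A's forward fold (which concatenates fragments onto the last accumulator element)
-- by a back-to-front build: split at the LAST '='-token, join the suffix as one group, repeat
-- on the prefix (alternative decomposition).

-- ===== PORT A =====
-- one loop step of A: append, or concatenate onto the last element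
def fixAttrStepA (fixed : List String) (a : String) : List String :=
  if PySem.Str.isIn "=" a then fixed ++ [a]
  else
    match fixed.getLast? with
    | some l => fixed.dropLast ++ [l ++ ";" ++ a]   -- fixed[-1] += ';%s' % a
    | none => fixed                                  -- Python raises IndexError here; excluded by Pre_

def fix_attr (attr_list : List String) : List String :=
  attr_list.foldl fixAttrStepA []

-- ===== PORT B =====
-- the generator 'i for i, a in enumerate(rest) if "=" in a' of Source B
def eqIdx (l : List String) : List Int :=
  ((PySem.List.enumerate l).filter (fun p => PySem.Str.isIn "=" p.2)).map Prod.fst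

-- 'max(...)' of Source B (none = Python's ValueError on an empty generator)
def lastEq (l : List String) : Option Int :=
  PySem.List.max? (eqIdx l) (fun x => x)

theorem mem_eqIdx (l : List String) (k : Int) :
    k ∈ eqIdx l ↔ ∃ (j : Nat) (h : j < l.length),
      k = (j : Int) ∧ PySem.Str.isIn "=" l[j] = true := by
  simp only [eqIdx, List.mem_map, List.mem_filter, PySem.List.mem_enumerate_iff]
  constructor
  · rintro ⟨p, ⟨⟨j, hj, rfl⟩, hp⟩, rfl⟩
    exact ⟨j, hj, by simp, hp⟩
  · rintro ⟨j, hj, rfl, hp⟩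
    exact ⟨((j : Int), l[j]), ⟨⟨j, hj, by simp⟩, hp⟩, rfl⟩

theorem lastEq_bound (l : List String) (k : Int) (h : lastEq l = some k) :
    0 ≤ k ∧ k.toNat < l.length := by
  have hm : k ∈ eqIdx l := PySem.List.max?_mem h
  obtain ⟨j, hj, rfl, _⟩ := (mem_eqIdx l k).mp hm
  simp; omega

-- the while loop of Source B: rest shrinks to rest[:k], each suffix joined onto the front of out
def fixAttrBack (rest out : List String) : List String :=
  match rest with
  | [] => out
  | x :: xs =>
    match h : lastEq (x :: xs) with
    | none => out   -- Python: max() on an empty generator raises ValueError; excluded by Pre_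
    | some k =>
      fixAttrBack (PySem.List.slice (x :: xs) none (some k))
        (PySem.Str.join ";" (PySem.List.slice (x :: xs) (some k) none) :: out)
  termination_by rest.length
  decreasing_by
    have hb := lastEq_bound (x :: xs) k h
    rw [PySem.List.slice_to _ hb.1]
    simp only [List.length_take]
    omega

def fix_attr_alt (attr_list : List String) : List String :=
  fixAttrBack attr_list []

-- ===== PRECONDITION & SPEC =====
-- Pre_ excludes exactly the inputs whose first element lacks '=': there A raises IndexError
-- (fixed[-1] on an empty list) and B raises ValueError (max() of an empty generator).
def Pre_fix_attr (attr_list : List String) : Prop :=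
  (attr_list.head?.all (fun h => PySem.Str.isIn "=" h)) = true
instance (attr_list : List String) : Decidable (Pre_fix_attr attr_list) := by
  unfold Pre_fix_attr; infer_instance

def pvWitness_fix_attr : List String := ["ID=gene1", "note extra", "Name=g1"]

def Spec_fix_attr (attr_list : List String) (out : List String) : Prop := out = fix_attr_alt attr_list
instance (attr_list : List String) (out : List String) : Decidable (Spec_fix_attr attr_list out) := by
  unfold Spec_fix_attr; infer_instance

-- ===== CLAIM (what is proved, stated in full; the proofs are below) =====
def Claim_equal_fix_attr : Prop := ∀ (attr_list : List String), Dom_fix_attr attr_list → Pre_fix_attr attr_list → Spec_fix_attr attr_list (fix_attr attr_list)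

-- ===== LEMMAS AND PROOFS =====

theorem str_join_singleton (p : String) : PySem.Str.join ";" [p] = p := by
  apply String.ext
  have h := PySem.Str.toList_join ";" [p]
  rw [h, List.map_singleton, PySem.Chars.join_singleton]

theorem chars_join_concat (sep : List Char) (gs : List (List Char)) (x a : List Char) :
    PySem.Chars.join sep (gs ++ [x] ++ [a]) = PySem.Chars.join sep (gs ++ [x]) ++ sep ++ a := by
  induction gs generalizing x with
  | nil => simp [PySem.Chars.join_cons_cons, PySem.Chars.join_singleton]
  | cons p gs ih =>
    cases gs with
    | nil => simp [PySem.Chars.join_cons_cons, PySem.Chars.join_singleton, List.append_assoc]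
    | cons q gs' =>
      simp only [List.cons_append]
      rw [PySem.Chars.join_cons_cons sep p q ((gs' ++ [x]) ++ [a]),
          PySem.Chars.join_cons_cons sep p q (gs' ++ [x])]
      have ihx := ih x
      simp only [List.cons_append] at ihx
      rw [ihx]
      simp [List.append_assoc]

theorem str_join_concat (g : List String) (x a : String) :
    PySem.Str.join ";" (g ++ [x] ++ [a]) = PySem.Str.join ";" (g ++ [x]) ++ ";" ++ a := by
  apply String.ext
  simp [PySem.Str.toList_join, List.append_assoc]
  have h3 := chars_join_concat [';'] (g.map String.toList) x.toList a.toList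
  simpa [List.append_assoc] using h3

theorem concat_shape {α : Type} (l : List α) (h : l ≠ []) : ∃ gs g, l = gs ++ [g] :=
  ⟨l.dropLast, l.getLast h, (List.dropLast_append_getLast h).symm⟩

-- the token at the last '='-index contains '='
theorem lastEq_get (l : List String) (k : Int) (h : lastEq l = some k)
    (hk : k.toNat < l.length) : PySem.Str.isIn "=" l[k.toNat] = true := by
  have hm : k ∈ eqIdx l := PySem.List.max?_mem h
  obtain ⟨j, hj, hkj, hp⟩ := (mem_eqIdx l k).mp hm
  have : k.toNat = j := by omega
  subst this
  exact hp

-- every token strictly after the last '='-index lacks '='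
theorem lastEq_after (l : List String) (k : Int) (h : lastEq l = some k)
    (j : Nat) (hj : j < l.length) (hgt : k.toNat < j) :
    PySem.Str.isIn "=" l[j] = false := by
  by_contra hc
  have hp : PySem.Str.isIn "=" l[j] = true := by
    cases hv : PySem.Str.isIn "=" l[j] with
    | true => rfl
    | false => exact absurd hv hc
  have hmem : (j : Int) ∈ eqIdx l := (mem_eqIdx l (j : Int)).mpr ⟨j, hj, rfl, hp⟩
  have hle := PySem.List.max?_isMax h _ hmem
  have h0 := (lastEq_bound l k h).1
  simp at hle
  omega

-- a nonempty list whose head contains '=' has a last '='-index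
theorem lastEq_isSome (x : String) (xs : List String)
    (hx : PySem.Str.isIn "=" x = true) : ∃ k, lastEq (x :: xs) = some k := by
  cases h : lastEq (x :: xs) with
  | some k => exact ⟨k, rfl⟩
  | none =>
    have hne : eqIdx (x :: xs) = [] := (PySem.List.max?_eq_none_iff _ _).mp h
    have h0 : (0 : Int) ∈ eqIdx (x :: xs) :=
      (mem_eqIdx _ _).mpr ⟨0, by simp, by simp, by simpa using hx⟩
    rw [hne] at h0
    simp at h0

-- folding A's step over '='-less fragments concatenates them all onto the last group
theorem frag_fold (frags : List String)
    (hf : ∀ a ∈ frags, PySem.Str.isIn "=" a = false) :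
    ∀ (st g : List String), g ≠ [] →
    List.foldl fixAttrStepA (st ++ [PySem.Str.join ";" g]) frags
      = st ++ [PySem.Str.join ";" (g ++ frags)] := by
  induction frags with
  | nil => intro st g _; simp
  | cons a t ih =>
    intro st g hg
    have ha : PySem.Str.isIn "=" a = false := hf a (by simp)
    obtain ⟨gi, gx, rfl⟩ := concat_shape g hg
    have hstep : fixAttrStepA (st ++ [PySem.Str.join ";" (gi ++ [gx])]) a
        = st ++ [PySem.Str.join ";" (gi ++ [gx] ++ [a])] := by
      simp only [fixAttrStepA, ha, Bool.false_eq_true, if_false, List.getLast?_append,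
        List.getLast?_singleton]
      rw [str_join_concat]
      simp
    have hrest : ∀ b ∈ t, PySem.Str.isIn "=" b = false := fun b hb => hf b (by simp [hb])
    simp only [List.foldl_cons, hstep]
    rw [ih hrest st (gi ++ [gx] ++ [a]) (by simp)]
    simp [List.append_assoc]

-- the heart: A's fold splits at the last '='-index
theorem fixA_split (l : List String) (k : Int) (h : lastEq l = some k) :
    fix_attr l = fix_attr (l.take k.toNat) ++ [PySem.Str.join ";" (l.drop k.toNat)] := by
  obtain ⟨_, hk⟩ := lastEq_bound l k h
  have hget := lastEq_get l k h hk
  have hdrop : l.drop k.toNat = l[k.toNat] :: l.drop (k.toNat + 1) :=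
    List.drop_eq_getElem_cons hk
  have hfrag : ∀ a ∈ l.drop (k.toNat + 1), PySem.Str.isIn "=" a = false := by
    intro a hmem
    obtain ⟨i, hi, rfl⟩ := List.mem_iff_getElem.mp hmem
    rw [List.getElem_drop]
    have hj : k.toNat + 1 + i < l.length := by
      simp only [List.length_drop] at hi; omega
    exact lastEq_after l k h _ hj (by omega)
  have hstep : fixAttrStepA (fix_attr (l.take k.toNat)) l[k.toNat]
      = fix_attr (l.take k.toNat) ++ [PySem.Str.join ";" [l[k.toNat]]] := by
    unfold fixAttrStepA
    rw [hget]
    simp [str_join_singleton]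
  calc fix_attr l
      = List.foldl fixAttrStepA [] (l.take k.toNat ++ l.drop k.toNat) := by
        unfold fix_attr; rw [List.take_append_drop]
    _ = List.foldl fixAttrStepA (fix_attr (l.take k.toNat)) (l.drop k.toNat) := by
        rw [List.foldl_append]; rfl
    _ = List.foldl fixAttrStepA (fix_attr (l.take k.toNat) ++ [PySem.Str.join ";" [l[k.toNat]]])
          (l.drop (k.toNat + 1)) := by rw [hdrop]; simp only [List.foldl_cons, hstep]
    _ = fix_attr (l.take k.toNat) ++ [PySem.Str.join ";" ([l[k.toNat]] ++ l.drop (k.toNat + 1))] :=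
        frag_fold _ hfrag _ _ (by simp)
    _ = fix_attr (l.take k.toNat) ++ [PySem.Str.join ";" (l.drop k.toNat)] := by
        rw [hdrop]; rfl

-- B's loop, with any pending output, equals A's result prepended to that output
theorem back_loop (n : Nat) : ∀ (l out : List String), l.length ≤ n →
    Pre_fix_attr l → fixAttrBack l out = fix_attr l ++ out := by
  induction n with
  | zero =>
    intro l out hlen _
    have : l = [] := List.eq_nil_of_length_eq_zero (by omega)
    subst this
    simp [fixAttrBack, fix_attr]
  | succ n ih =>
    intro l out hlen hpre
    cases l with
    | nil => simp [fixAttrBack, fix_attr]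
    | cons x xs =>
      have hx : PySem.Str.isIn "=" x = true := by
        simpa [Pre_fix_attr] using hpre
      obtain ⟨k, hk⟩ := lastEq_isSome x xs hx
      obtain ⟨h0, hlt⟩ := lastEq_bound (x :: xs) k hk
      have hslice1 : PySem.List.slice (x :: xs) none (some k) = (x :: xs).take k.toNat :=
        PySem.List.slice_to _ h0
      have hslice2 : PySem.List.slice (x :: xs) (some k) none = (x :: xs).drop k.toNat :=
        PySem.List.slice_from _ h0
      have hunfold : fixAttrBack (x :: xs) out
          = fixAttrBack ((x :: xs).take k.toNat)
              (PySem.Str.join ";" ((x :: xs).drop k.toNat) :: out) := by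
        rw [fixAttrBack, hk]
        split
        next heq => exact absurd heq (by simp)
        next k' heq =>
          obtain rfl : k = k' := by injection heq
          rw [hslice1, hslice2]
      rw [hunfold]
      have hprefix : Pre_fix_attr ((x :: xs).take k.toNat) := by
        cases hkn : k.toNat with
        | zero => simp [Pre_fix_attr]
        | succ m =>
          simp only [Pre_fix_attr, List.take_succ_cons, List.head?_cons, Option.all_some]
          exact hx
      have hlen' : ((x :: xs).take k.toNat).length ≤ n := by
        simp only [List.length_take]
        simp at hlen hlt
        omega
      rw [ih _ _ hlen' hprefix]
      rw [fixA_split (x :: xs) k hk]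
      simp

-- ===== VERDICT (by name: the statement is the Claim_ definition above) =====
theorem fix_attr_spec : Claim_equal_fix_attr := by
  intro attr_list _ hpre
  unfold Spec_fix_attr fix_attr_alt
  rw [back_loop attr_list.length attr_list [] le_rfl hpre]
  simp
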